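-- pv_equiv track=rewrite | github.com/michael-howell-island/codesurface | src/codesurface/parsers/cpp.py | _count_parens
-- ===== SOURCE A (Python) =====
-- def _count_parens(line: str) -> int:
--     """Count net parenthesis depth change."""
--     depth = 0
--     in_double = False
--     in_single = False
--     escape = False
--
--     for ch in line:
--         if escape:
--             escape = False
--             continue
--         if ch == "\\":
--             escape = True
--             continue
--         if in_single:
--             if ch == "'":
--                 in_single = False
--             continue
--         if in_double:
--             if ch == '"':
--                 in_double = False
--             continue
--         if ch == "'":
--             in_single = True
--         elif ch == '"':
--             in_double = True
--         elif ch == "(":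
--             depth += 1
--         elif ch == ")":
--             depth -= 1
--
--     return depth
-- ===== SOURCE B (Python) =====
-- def _count_parens(line: str) -> int:
--     """Count net parenthesis depth change (literal-skipping scan)."""
--
--     def skip_literal(i: int, quote: str) -> int:
--         """Return the index just past the closing quote (or end of line)."""
--         n = len(line)
--         while i < n:
--             c = line[i]
--             if c == "\\":
--                 i += 2
--             elif c == quote:
--                 return i + 1
--             else:
--                 i += 1
--         return i
--
--     depth = 0
--     i = 0
--     n = len(line)
--     while i < n:
--         c = line[i]
--         if c == "\\":
--             i += 2
--         elif c == "'" or c == '"':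
--             i = skip_literal(i + 1, c)
--         elif c == "(":
--             depth += 1
--             i += 1
--         elif c == ")":
--             depth -= 1
--             i += 1
--         else:
--             i += 1
--     return depth
-- ===== Notes on version B (the rewrite author's own statement) =====
-- stated objective: alternative
-- what changed: A's single character loop threading four state flags (depth, in_double, in_single, escape) is replaced by an index-advancing scan with a helper that consumes each quoted literal (and escape pairs) outright, so the main loop only ever sees code outside literals.
import Mathlib
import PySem

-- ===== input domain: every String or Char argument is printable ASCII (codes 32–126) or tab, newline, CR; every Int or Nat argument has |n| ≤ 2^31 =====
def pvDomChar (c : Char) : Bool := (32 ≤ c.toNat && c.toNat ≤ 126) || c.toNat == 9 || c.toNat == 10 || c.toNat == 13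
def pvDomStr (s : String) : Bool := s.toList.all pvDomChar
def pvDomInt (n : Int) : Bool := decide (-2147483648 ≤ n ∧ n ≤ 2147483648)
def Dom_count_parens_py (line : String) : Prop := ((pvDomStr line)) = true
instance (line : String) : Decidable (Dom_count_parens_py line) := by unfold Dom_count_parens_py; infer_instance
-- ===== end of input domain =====

-- B replaces A's four-flag state machine by a literal-skipping scan (a helper consumes each
-- string/char literal); same values everywhere, objective: simpler/alternative decomposition.

-- ===== PORT A =====
-- state = (depth, in_double, in_single, escape), exactly A's loop body
def stepA : Int × Bool × Bool × Bool → Char → Int × Bool × Bool × Bool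
  | (d, bd, bs, esc), ch =>
    if esc then (d, bd, bs, false)
    else if ch = '\\' then (d, bd, bs, true)
    else if bs then (if ch = '\'' then (d, bd, false, false) else (d, bd, bs, false))
    else if bd then (if ch = '"' then (d, false, bs, false) else (d, bd, bs, false))
    else if ch = '\'' then (d, bd, true, false)
    else if ch = '"' then (d, true, bs, false)
    else if ch = '(' then (d + 1, bd, bs, false)
    else if ch = ')' then (d - 1, bd, bs, false)
    else (d, bd, bs, false)

def count_parens_py (line : String) : Int :=
  (line.toList.foldl stepA (0, false, false, false)).1

-- ===== PORT B =====
-- helper: consume a literal up to (and past) the closing quote, honouring backslash escapes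
-- (Python's `i += 2` on a backslash = drop the escaped character, i.e. `rest.drop 1`)
def skipB (q : Char) : List Char → List Char
  | [] => []
  | c :: rest =>
    if c = '\\' then skipB q (rest.drop 1)
    else if c = q then rest
    else skipB q rest
termination_by l => l.length
decreasing_by
  · simp
  · simp

theorem skipB_length_le (q : Char) (l : List Char) : (skipB q l).length ≤ l.length := by
  generalize hn : l.length = n
  induction n using Nat.strong_induction_on generalizing l with
  | _ n ih =>
    cases l with
    | nil => simp [skipB]
    | cons c rest =>
      subst hn
      by_cases hc : c = '\\'
      · simp only [skipB, if_pos hc]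
        have h1 : (rest.drop 1).length < (c :: rest).length := by simp
        exact Nat.le_trans (ih _ h1 _ rfl) (Nat.le_of_lt h1)
      · by_cases hq : c = q
        · subst hq; simp [skipB, hc]
        · simp only [skipB, if_neg hc, if_neg hq]
          have h1 : rest.length < (c :: rest).length := by simp
          exact Nat.le_trans (ih _ h1 _ rfl) (Nat.le_of_lt h1)

def countB : List Char → Int
  | [] => 0
  | c :: rest =>
    if c = '\\' then countB (rest.drop 1)
    else if c = '\'' then countB (skipB '\'' rest)
    else if c = '"' then countB (skipB '"' rest)
    else if c = '(' then countB rest + 1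
    else if c = ')' then countB rest - 1
    else countB rest
termination_by l => l.length
decreasing_by
  · simp
  · exact Nat.lt_succ_of_le (skipB_length_le _ _)
  · exact Nat.lt_succ_of_le (skipB_length_le _ _)
  · simp
  · simp
  · simp

def count_parens_py_alt (line : String) : Int := countB line.toList

-- ===== PRECONDITION & SPEC =====
def Spec_count_parens_py (line : String) (out : Int) : Prop := out = count_parens_py_alt line
instance (line : String) (out : Int) : Decidable (Spec_count_parens_py line out) := by unfold Spec_count_parens_py; infer_instance

-- ===== CLAIM (what is proved, stated in full; the proofs are below) =====
def Claim_equal_count_parens_py : Prop := ∀ (line : String), Dom_count_parens_py line → Spec_count_parens_py line (count_parens_py line)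

-- ===== LEMMAS AND PROOFS =====

-- The single invariant: a fold of A's step function starting in any non-escape state with at
-- most one of the two string flags set equals d plus B's count of the list under B's skipping
-- discipline for that mode.
theorem fold_stepA_eq (n : Nat) : ∀ (l : List Char), l.length ≤ n → ∀ (d : Int) (bd bs : Bool),
    (bd && bs) = false →
    (List.foldl stepA (d, bd, bs, false) l).1 =
      d + (if bs then countB (skipB '\'' l)
           else if bd then countB (skipB '"' l)
           else countB l) := by
  induction n with
  | zero =>
      intro l hl d bd bs _
      have : l = [] := List.eq_nil_of_length_eq_zero (Nat.le_zero.mp hl)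
      subst this
      cases bs <;> cases bd <;> simp [countB, skipB]
  | succ n ih =>
      intro l hl d bd bs hb
      cases l with
      | nil => cases bs <;> cases bd <;> simp [countB, skipB]
      | cons c rest =>
        by_cases hc : c = '\\'
        · subst hc
          cases rest with
          | nil =>
              cases bs <;> cases bd <;>
                simp [List.foldl, stepA, countB, skipB]
          | cons c2 rest' =>
              have hstep : List.foldl stepA (d, bd, bs, false) ('\\' :: c2 :: rest')
                  = List.foldl stepA (d, bd, bs, false) rest' := by
                cases bs <;> cases bd <;> simp [List.foldl, stepA]
              have hlen : rest'.length ≤ n := by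
                simp at hl; omega
              rw [hstep, ih rest' hlen d bd bs hb]
              cases bs <;> cases bd <;> simp [countB, skipB]
        · cases bs with
          | true =>
              have hbd : bd = false := by cases bd <;> simp_all
              subst hbd
              have hlen : rest.length ≤ n := by simp at hl; omega
              by_cases hq : c = '\''
              · subst hq
                have : List.foldl stepA (d, false, true, false) ('\'' :: rest)
                    = List.foldl stepA (d, false, false, false) rest := by
                  simp [List.foldl, stepA]
                rw [this, ih rest hlen d false false rfl]
                simp [skipB]
              · have : List.foldl stepA (d, false, true, false) (c :: rest)
                    = List.foldl stepA (d, false, true, false) rest := by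
                  simp [List.foldl, stepA, hc, hq]
                rw [this, ih rest hlen d false true rfl]
                simp [skipB, hc, hq]
          | false =>
            cases bd with
            | true =>
                have hlen : rest.length ≤ n := by simp at hl; omega
                by_cases hq : c = '"'
                · subst hq
                  have : List.foldl stepA (d, true, false, false) ('"' :: rest)
                      = List.foldl stepA (d, false, false, false) rest := by
                    simp [List.foldl, stepA]
                  rw [this, ih rest hlen d false false rfl]
                  simp [skipB]
                · have : List.foldl stepA (d, true, false, false) (c :: rest)
                      = List.foldl stepA (d, true, false, false) rest := by
                    simp [List.foldl, stepA, hc, hq]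
                  rw [this, ih rest hlen d true false rfl]
                  simp [skipB, hc, hq]
            | false =>
                have hlen : rest.length ≤ n := by simp at hl; omega
                by_cases h1 : c = '\''
                · subst h1
                  have : List.foldl stepA (d, false, false, false) ('\'' :: rest)
                      = List.foldl stepA (d, false, true, false) rest := by
                    simp [List.foldl, stepA]
                  rw [this, ih rest hlen d false true rfl]
                  rw [countB]; simp
                · by_cases h2 : c = '"'
                  · subst h2
                    have : List.foldl stepA (d, false, false, false) ('"' :: rest)
                        = List.foldl stepA (d, true, false, false) rest := by
                      simp [List.foldl, stepA]
                    rw [this, ih rest hlen d true false rfl]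
                    rw [countB]; simp
                  · by_cases h3 : c = '('
                    · subst h3
                      have : List.foldl stepA (d, false, false, false) ('(' :: rest)
                          = List.foldl stepA (d + 1, false, false, false) rest := by
                        simp [List.foldl, stepA]
                      rw [this, ih rest hlen (d + 1) false false rfl]
                      rw [countB]; simp; ring
                    · by_cases h4 : c = ')'
                      · subst h4
                        have : List.foldl stepA (d, false, false, false) (')' :: rest)
                            = List.foldl stepA (d - 1, false, false, false) rest := by
                          simp [List.foldl, stepA]
                        rw [this, ih rest hlen (d - 1) false false rfl]
                        rw [countB]; simp; ring
                      · have : List.foldl stepA (d, false, false, false) (c :: rest)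
                            = List.foldl stepA (d, false, false, false) rest := by
                          simp [List.foldl, stepA, hc, h1, h2, h3, h4]
                        rw [this, ih rest hlen d false false rfl]
                        rw [countB]; simp [hc, h1, h2, h3, h4]

-- ===== VERDICT (by name: the statement is the Claim_ definition above) =====
theorem count_parens_py_spec : Claim_equal_count_parens_py := by
  intro line _
  unfold Spec_count_parens_py count_parens_py count_parens_py_alt
  simpa using fold_stepA_eq line.toList.length line.toList (Nat.le_refl _) 0 false false rfl
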